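-- pv_equiv track=rewrite | github.com/erickrodrigs/MAC0327 | lista02/E.py | get_number_of_happy_substr
-- ===== SOURCE A (Python) =====
-- def generate_dict_key(characters_freq):
--     return ",".join(map(str, characters_freq))
--
-- def get_number_of_happy_substr(s):
--     answer = 0
--     frequencies = dict()
--     characters_freq = [0] * 10
--     key = generate_dict_key(characters_freq)
--     frequencies[key] = 1
--
--     for character in s:
--         index = ord(character) - ord('0')
--         characters_freq[index] += 1
--         characters_freq[index] %= 2
--         key = generate_dict_key(characters_freq)
--
--         if key in frequencies:
--             frequencies[key] += 1
--         else:
--             frequencies[key] = 1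
--
--     for value in frequencies.values():
--         answer += (value * (value - 1)) // 2
--
--     return answer
-- ===== SOURCE B (Python) =====
-- def get_number_of_happy_substr(s):
--     parity = [0] * 10
--     states = [tuple(parity)]
--     for character in s:
--         index = ord(character) - ord('0')
--         parity[index] ^= 1
--         states.append(tuple(parity))
--     states.sort()
--     answer = 0
--     run = 1
--     for prev, cur in zip(states, states[1:]):
--         if cur == prev:
--             run += 1
--         else:
--             answer += run * (run - 1) // 2
--             run = 1
--     answer += run * (run - 1) // 2
--     return answer
-- ===== Notes on version B (the rewrite author's own statement) =====
-- stated objective: alternative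
-- what changed: Replaces A's hash-map grouping (a dict counting each comma-joined parity-string key, then summing v*(v-1)//2 over its values) by sort-then-scan: collect every prefix parity state as a tuple in a list, sort the list so equal states become adjacent, and sum run*(run-1)//2 over the runs of equal neighbours in one zip scan - no dict and no string keys.
import Mathlib
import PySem

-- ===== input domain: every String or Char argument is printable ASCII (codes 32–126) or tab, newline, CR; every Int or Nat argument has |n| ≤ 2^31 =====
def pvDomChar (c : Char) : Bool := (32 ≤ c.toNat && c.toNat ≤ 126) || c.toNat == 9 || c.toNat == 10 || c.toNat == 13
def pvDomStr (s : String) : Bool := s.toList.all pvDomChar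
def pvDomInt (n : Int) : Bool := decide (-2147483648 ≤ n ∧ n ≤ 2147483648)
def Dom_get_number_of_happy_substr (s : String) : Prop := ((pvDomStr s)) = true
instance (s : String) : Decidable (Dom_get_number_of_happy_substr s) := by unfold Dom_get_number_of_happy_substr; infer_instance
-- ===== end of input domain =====

-- B replaces A's dict-of-key-strings grouping (count each comma-joined parity string, then sum
-- v*(v-1)//2 over the dict values) by sort-then-scan: it collects all prefix parity states in a
-- list, sorts it so equal states are adjacent, and sums run*(run-1)//2 over the runs
-- (objective: alternative — a different grouping data structure, no dict and no string keys).

-- ===== PORT A =====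
def generate_dict_key (characters_freq : List Int) : String :=
  PySem.Str.join "," (characters_freq.map PySem.Int.toStr)

-- loop body of A's 'for character in s'; none = IndexError from characters_freq[index].
-- (Python's 'characters_freq[index] += 1; characters_freq[index] %= 2' reads v and writes
-- (v+1) % 2 back to the same cell; ported as one pySetD of PySem.Int.mod (v+1) 2.)
def pyAStep (st : Option (PySem.Dict String Int × List Int)) (character : Char) :
    Option (PySem.Dict String Int × List Int) :=
  match st with
  | none => none
  | some (frequencies, characters_freq) =>
    let index : Int := (character.toNat : Int) - 48
    match PySem.List.pyGet? characters_freq index with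
    | none => none
    | some v =>
      let characters_freq := PySem.List.pySetD characters_freq index (PySem.Int.mod (v + 1) 2)
      let key := generate_dict_key characters_freq
      let frequencies := if frequencies.contains key
        then frequencies.insert key (frequencies.getD key 0 + 1)
        else frequencies.insert key 1
      some (frequencies, characters_freq)

def get_number_of_happy_substr (s : String) : Int :=
  let characters_freq : List Int := List.replicate 10 0
  let key := generate_dict_key characters_freq
  let frequencies : PySem.Dict String Int := PySem.Dict.empty.insert key 1
  match s.toList.foldl pyAStep (some (frequencies, characters_freq)) with
  | none => 0  -- unreachable under Pre_ (IndexError in Python)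
  | some (frequencies, _) =>
      frequencies.values.foldl (fun answer v => answer + PySem.Int.floordiv (v * (v - 1)) 2) 0

-- ===== PORT B =====
-- run * (run - 1) // 2 (written twice in Source B; one definition here)
def pvC (run : Int) : Int := PySem.Int.floordiv (run * (run - 1)) 2

-- body of B's first loop over (parity, states); none = IndexError from parity[index]
-- (B indexes the parity list exactly as A does, so it raises where A raises).
def pyBStep (st : Option (List Int × List (List Int))) (character : Char) :
    Option (List Int × List (List Int)) :=
  match st with
  | none => none
  | some (parity, states) =>
    let index : Int := (character.toNat : Int) - 48
    match PySem.List.pyGet? parity index with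
    | none => none
    | some v =>
      let parity := PySem.List.pySetD parity index (PySem.Int.bxor v 1)
      some (parity, states ++ [parity])

-- body of B's second loop 'for prev, cur in zip(states, states[1:])' over (answer, run)
def pyScanStep (p : Int × Int) (pc : List Int × List Int) : Int × Int :=
  if pc.2 == pc.1 then (p.1, p.2 + 1) else (p.1 + pvC p.2, 1)

def get_number_of_happy_substr_alt (s : String) : Int :=
  let parity : List Int := List.replicate 10 0
  let states : List (List Int) := [parity]
  match s.toList.foldl pyBStep (some (parity, states)) with
  | none => 0  -- unreachable under Pre_ (IndexError in Python)
  | some (_, states) =>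
    let states := PySem.List.sorted states (fun x => x) false
    let p := (states.zip (PySem.List.slice states (some 1) none)).foldl pyScanStep (0, 1)
    p.1 + pvC p.2

-- ===== PRECONDITION & SPEC =====
-- Pre_ excludes exactly the strings on which A raises IndexError: a character c with
-- ord(c) - 48 outside [-10, 9] (i.e. outside codes 38..57) makes characters_freq[index] raise.
def Pre_get_number_of_happy_substr (s : String) : Prop :=
  (s.toList.all (fun c => 38 ≤ c.toNat && c.toNat ≤ 57)) = true

instance (s : String) : Decidable (Pre_get_number_of_happy_substr s) := by
  unfold Pre_get_number_of_happy_substr; infer_instance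

def pvWitness_get_number_of_happy_substr : String := "1221"

def Spec_get_number_of_happy_substr (s : String) (out : Int) : Prop :=
  out = get_number_of_happy_substr_alt s
instance (s : String) (out : Int) : Decidable (Spec_get_number_of_happy_substr s out) := by
  unfold Spec_get_number_of_happy_substr; infer_instance

-- ===== CLAIM (what is proved, stated in full; the proofs are below) =====
def Claim_equal_get_number_of_happy_substr : Prop := ∀ (s : String), Dom_get_number_of_happy_substr s → Pre_get_number_of_happy_substr s → Spec_get_number_of_happy_substr s (get_number_of_happy_substr s)

-- ===== LEMMAS AND PROOFS =====

-- abstract model shared by both proofs: the (length-10, 0/1) digit-parity vector,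
-- its per-character step, and the list of successive prefix parity states
def vpos (c : Char) : Nat := (PySem.Int.mod ((c.toNat : Int) - 48) 10).toNat

def vstep (f : List Int) (c : Char) : List Int :=
  f.set (vpos c) (PySem.Int.mod (f.getD (vpos c) 0 + 1) 2)

def vstates (f : List Int) : List Char → List (List Int)
  | [] => [f]
  | c :: cs => f :: vstates (vstep f c) cs

def vgood (f : List Int) : Prop := f.length = 10 ∧ ∀ x ∈ f, x = 0 ∨ x = 1

-- the counter dict A's loop builds, and the sum of C(count,2) over the distinct elements
def dictOf {κ : Type} [BEq κ] (ks : List κ) : PySem.Dict κ Int :=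
  ks.foldl (fun d k => d.insert k (d.getD k 0 + 1)) PySem.Dict.empty

def sumC {κ : Type} [BEq κ] (ks : List κ) : Int :=
  ((PySem.Set.ofList ks).map (fun k => pvC (ks.count k : Int))).sum

-- B's run scan, as structural recursion on the sorted list
def runScan {α : Type} [BEq α] (ans run : Int) (prev : α) : List α → Int
  | [] => ans + pvC run
  | x :: r => if x == prev then runScan ans (run + 1) x r else runScan (ans + pvC run) 1 x r

lemma vpos_eq (c : Char) (hc : 38 ≤ c.toNat ∧ c.toNat ≤ 57) :
    vpos c = if 48 ≤ c.toNat then c.toNat - 48 else c.toNat - 38 := by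
  unfold vpos
  rw [PySem.Int.mod_eq_emod_of_pos (by norm_num)]
  split <;> omega

lemma pyGet?_bridge (f : List Int) (c : Char) (hf : f.length = 10)
    (hc : 38 ≤ c.toNat ∧ c.toNat ≤ 57) :
    PySem.List.pyGet? f ((c.toNat : Int) - 48) = some (f.getD (vpos c) 0) := by
  rw [vpos_eq c hc]
  by_cases h : 48 ≤ c.toNat
  · simp only [if_pos h]
    rw [PySem.List.pyGet?_of_nonneg f (by omega)]
    have he : ((c.toNat : Int) - 48).toNat = c.toNat - 48 := by omega
    rw [he, List.getElem?_eq_getElem (by omega), List.getD_eq_getElem _ _ (by omega)]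
  · simp only [if_neg h]
    have hk : (c.toNat : Int) - 48 = -(((48 - c.toNat : Nat) : Nat) : Int) := by omega
    rw [hk, PySem.List.pyGet?_neg_natCast f _ (by omega) (by omega)]
    have he : f.length - (48 - c.toNat) = c.toNat - 38 := by omega
    rw [he, List.getElem?_eq_getElem (by omega), List.getD_eq_getElem _ _ (by omega)]

lemma pySetD_bridge (f : List Int) (c : Char) (v : Int) (hf : f.length = 10)
    (hc : 38 ≤ c.toNat ∧ c.toNat ≤ 57) :
    PySem.List.pySetD f ((c.toNat : Int) - 48) v = f.set (vpos c) v := by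
  rw [vpos_eq c hc]
  simp only [PySem.List.pySetD, PySem.List.pySet?, PySem.List.pyIdx?, hf]
  by_cases h : 48 ≤ c.toNat
  · simp only [if_pos h]
    rw [if_pos (by omega), if_pos (by omega), Option.map_some, Option.getD_some]
    congr 1
    omega
  · simp only [if_neg h]
    rw [if_neg (by omega), if_pos (by omega), Option.map_some, Option.getD_some]
    congr 1
    omega

lemma mod_two_01 (x : Int) : PySem.Int.mod x 2 = 0 ∨ PySem.Int.mod x 2 = 1 := by
  have h1 := PySem.Int.mod_lt x (b := 2) (by norm_num)
  have h2 := PySem.Int.mod_nonneg x (b := 2) (by norm_num)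
  omega

lemma vgood_vstep (f : List Int) (c : Char) (hf : vgood f) : vgood (vstep f c) := by
  obtain ⟨hl, h01⟩ := hf
  refine ⟨by simp [vstep, hl], ?_⟩
  intro x hx
  rcases List.mem_or_eq_of_mem_set hx with h | h
  · exact h01 x h
  · subst h; exact mod_two_01 _

lemma vgood_mem_vstates (f : List Int) (cs : List Char) (hf : vgood f) :
    ∀ v ∈ vstates f cs, vgood v := by
  induction cs generalizing f with
  | nil => simpa [vstates] using hf
  | cons c cs ih =>
    intro v hv
    rcases (by simpa [vstates] using hv : v = f ∨ v ∈ vstates (vstep f c) cs) with h | h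
    · subst h; exact hf
    · exact ih (vstep f c) (vgood_vstep f c hf) v h

lemma toChars_zero : PySem.Int.toChars 0 = ['0'] := by decide
lemma toChars_one : PySem.Int.toChars 1 = ['1'] := by decide

lemma genkey_toList (f : List Int) :
    (generate_dict_key f).toList = PySem.Chars.join [','] (f.map PySem.Int.toChars) := by
  unfold generate_dict_key
  rw [PySem.Str.toList_join]
  congr 1
  rw [List.map_map]
  exact List.map_congr_left (fun x _ => PySem.Int.toList_toStr x)

lemma joinkey_inj (f1 : List Int) : ∀ (f2 : List Int), f1.length = f2.length →
    (∀ x ∈ f1, x = 0 ∨ x = 1) → (∀ x ∈ f2, x = 0 ∨ x = 1) →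
    PySem.Chars.join [','] (f1.map PySem.Int.toChars)
      = PySem.Chars.join [','] (f2.map PySem.Int.toChars) → f1 = f2 := by
  induction f1 with
  | nil =>
    intro f2 hl _ _ _
    cases f2 with
    | nil => rfl
    | cons y u => simp at hl
  | cons x t ih =>
    intro f2 hl h1 h2 h
    cases f2 with
    | nil => simp at hl
    | cons y u =>
      have hx := h1 x List.mem_cons_self
      have hy := h2 y List.mem_cons_self
      cases t with
      | nil =>
        cases u with
        | nil =>
          simp only [List.map_cons, List.map_nil, PySem.Chars.join_singleton] at h
          rcases hx with h' | h' <;> rcases hy with h'' | h'' <;> subst h' <;> subst h'' <;>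
            first | rfl | (rw [toChars_zero, toChars_one] at h; simp at h)
        | cons b u' => simp at hl
      | cons a t' =>
        cases u with
        | nil => simp at hl
        | cons b u' =>
          simp only [List.map_cons, PySem.Chars.join_cons_cons] at h
          have key : x = y ∧ PySem.Chars.join [','] ((a :: t').map PySem.Int.toChars)
              = PySem.Chars.join [','] ((b :: u').map PySem.Int.toChars) := by
            rcases hx with h' | h' <;> rcases hy with h'' | h'' <;> subst h' <;> subst h'' <;>
              simp only [toChars_zero, toChars_one, List.map_cons] at h ⊢ <;> simp_all
          exact congrArg₂ List.cons key.1
            (ih (b :: u') (by simpa using hl)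
              (fun z hz => h1 z (List.mem_cons_of_mem _ hz))
              (fun z hz => h2 z (List.mem_cons_of_mem _ hz)) key.2)

lemma genkey_inj (f1 f2 : List Int) (hl : f1.length = f2.length)
    (h1 : ∀ x ∈ f1, x = 0 ∨ x = 1) (h2 : ∀ x ∈ f2, x = 0 ∨ x = 1)
    (h : generate_dict_key f1 = generate_dict_key f2) : f1 = f2 := by
  apply joinkey_inj f1 f2 hl h1 h2
  rw [← genkey_toList, ← genkey_toList, h]

lemma count_map_inj {α β : Type} [BEq α] [LawfulBEq α] [BEq β] [LawfulBEq β] (g : α → β)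
    (pre : List α) (x : α) (hinj : ∀ a ∈ pre, g a = g x → a = x) :
    (pre.map g).count (g x) = pre.count x := by
  induction pre with
  | nil => simp
  | cons p t ih =>
    have h1 : ∀ a ∈ t, g a = g x → a = x := fun a ha => hinj a (List.mem_cons_of_mem _ ha)
    by_cases hp : p = x
    · subst hp
      simp [ih h1]
    · have hg : ¬ (g p = g x) := fun hgp => hp (hinj p List.mem_cons_self hgp)
      simp [ih h1, hp, hg]

-- H1: sums of a pointwise-equal function over two duplicate-free lists with the same elements
lemma sum_map_congr_mem {α : Type} (l1 l2 : List α) (f g : α → Int)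
    (h1 : l1.Nodup) (h2 : l2.Nodup) (hm : ∀ x, x ∈ l1 ↔ x ∈ l2)
    (hfg : ∀ x ∈ l1, f x = g x) : (l1.map f).sum = (l2.map g).sum := by
  have hp : l1.Perm l2 := by
    classical
    exact (List.perm_ext_iff_of_nodup h1 h2).mpr hm
  calc (l1.map f).sum = (l1.map g).sum := by rw [List.map_congr_left hfg]
    _ = (l2.map g).sum := (hp.map g).sum_eq

-- H2: split one element out of a sum over a duplicate-free list
lemma sum_map_split {α : Type} [BEq α] [LawfulBEq α] (l : List α) (y : α) (f : α → Int)
    (hnd : l.Nodup) (hy : y ∈ l) :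
    (l.map f).sum = f y + ((l.filter (fun k => !(k == y))).map f).sum := by
  induction l with
  | nil => simp at hy
  | cons p t ih =>
    rcases List.mem_cons.mp hy with h | h
    · subst h
      have hnx : y ∉ t := (List.nodup_cons.mp hnd).1
      have hft : t.filter (fun k => !(k == y)) = t :=
        List.filter_eq_self.mpr (fun a ha => by
          simp only [Bool.not_eq_eq_eq_not, Bool.not_true, beq_eq_false_iff_ne]
          exact fun he => hnx (he ▸ ha))
      rw [List.filter_cons_of_neg (by simp), hft]
      simp
    · have hp : p ≠ y := fun he => (List.nodup_cons.mp hnd).1 (he ▸ h)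
      rw [List.filter_cons_of_pos (by simpa using hp)]
      simp only [List.map_cons, List.sum_cons, ih (List.nodup_cons.mp hnd).2 h]
      ring

lemma count_filter_ne {α : Type} [BEq α] [LawfulBEq α] (l : List α) (x y : α) (hxy : x ≠ y) :
    (l.filter (fun k => !(k == y))).count x = l.count x := by
  induction l with
  | nil => rfl
  | cons p t ih =>
    by_cases hp : p = y
    · subst hp
      rw [List.filter_cons_of_neg (by simp), ih, List.count_cons_of_ne (Ne.symm hxy)]
    · rw [List.filter_cons_of_pos (by simpa using hp), List.count_cons, List.count_cons, ih]

lemma sumC_nil {κ : Type} [BEq κ] : sumC ([] : List κ) = 0 := by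
  simp [sumC, PySem.Set.ofList]

-- H3: peel the head's whole group off sumC
lemma sumC_cons {α : Type} [BEq α] [LawfulBEq α] (y : α) (r : List α) :
    sumC (y :: r) = pvC (((y :: r).count y : Nat) : Int)
      + sumC (r.filter (fun k => !(k == y))) := by
  unfold sumC
  have hnd := PySem.Set.nodup_ofList (y :: r)
  have hy : y ∈ PySem.Set.ofList (y :: r) :=
    (PySem.Set.mem_ofList _ y).mpr List.mem_cons_self
  rw [sum_map_split _ y _ hnd hy]
  congr 1
  apply sum_map_congr_mem
  · exact List.Nodup.filter _ hnd
  · exact PySem.Set.nodup_ofList _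
  · intro k
    simp only [List.mem_filter, PySem.Set.mem_ofList, List.mem_cons,
      Bool.not_eq_eq_eq_not, Bool.not_true, beq_eq_false_iff_ne]
    constructor
    · rintro ⟨h | h, hk⟩
      · exact absurd h hk
      · exact ⟨h, hk⟩
    · rintro ⟨h, hk⟩
      exact ⟨Or.inr h, hk⟩
  · intro k hk
    have hk2 := List.mem_filter.mp hk
    have hkne : k ≠ y := by simpa using hk2.2
    have h1 : (y :: r).count k = r.count k := List.count_cons_of_ne (Ne.symm hkne)
    have h2 : (r.filter (fun k => !(k == y))).count k = r.count k :=
      count_filter_ne r k y hkne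
    rw [h1, h2]

-- sumC only depends on the multiset of elements
lemma sumC_perm {α : Type} [BEq α] [LawfulBEq α] (xs ys : List α) (hp : xs.Perm ys) :
    sumC xs = sumC ys := by
  unfold sumC
  apply sum_map_congr_mem
  · exact PySem.Set.nodup_ofList _
  · exact PySem.Set.nodup_ofList _
  · intro k
    rw [PySem.Set.mem_ofList, PySem.Set.mem_ofList]
    exact hp.mem_iff
  · intro k _
    rw [hp.count_eq]

-- sumC is invariant under an injective relabelling of the elements
lemma sumC_map_inj {α β : Type} [BEq α] [LawfulBEq α] [BEq β] [LawfulBEq β]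
    (g : α → β) (l : List α) (hinj : ∀ a ∈ l, ∀ b ∈ l, g a = g b → a = b) :
    sumC (l.map g) = sumC l := by
  unfold sumC
  have step1 : ((PySem.Set.ofList (l.map g)).map (fun k => pvC ((l.map g).count k : Int))).sum
      = (((PySem.Set.ofList l).map g).map (fun k => pvC ((l.map g).count k : Int))).sum := by
    apply sum_map_congr_mem
    · exact PySem.Set.nodup_ofList _
    · refine List.Nodup.map_on ?_ (PySem.Set.nodup_ofList l)
      intro a ha b hb hab
      exact hinj a ((PySem.Set.mem_ofList l a).mp ha) b ((PySem.Set.mem_ofList l b).mp hb) hab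
    · intro k
      rw [PySem.Set.mem_ofList, List.mem_map, List.mem_map]
      constructor
      · rintro ⟨a, ha, rfl⟩
        exact ⟨a, (PySem.Set.mem_ofList l a).mpr ha, rfl⟩
      · rintro ⟨a, ha, rfl⟩
        exact ⟨a, (PySem.Set.mem_ofList l a).mp ha, rfl⟩
    · intro k _
      rfl
  rw [step1, List.map_map]
  refine congrArg List.sum (List.map_congr_left ?_)
  intro a ha
  have hal : a ∈ l := (PySem.Set.mem_ofList l a).mp ha
  simp only [Function.comp_apply]
  congr 1
  exact_mod_cast count_map_inj g l a (fun b hb hgb => hinj b hb a hal hgb)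

lemma vstates_head (f : List Int) (cs : List Char) :
    vstates f cs = f :: (vstates f cs).tail := by cases cs <;> rfl

lemma pyAStep_some (f : List Int) (d : PySem.Dict String Int) (c : Char)
    (hf : vgood f) (hc : 38 ≤ c.toNat ∧ c.toNat ≤ 57) :
    pyAStep (some (d, f)) c =
      some (d.insert (generate_dict_key (vstep f c))
              (d.getD (generate_dict_key (vstep f c)) 0 + 1), vstep f c) := by
  simp only [pyAStep, pyGet?_bridge f c hf.1 hc, pySetD_bridge f c _ hf.1 hc]
  rw [show f.set (vpos c) (PySem.Int.mod (f.getD (vpos c) 0 + 1) 2) = vstep f c from rfl]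
  by_cases hcont : d.contains (generate_dict_key (vstep f c)) = true
  · rw [if_pos hcont]
  · rw [if_neg hcont,
      PySem.Dict.getD_of_not_contains d 0 (Bool.not_eq_true _ ▸ hcont : _ = false)]
    norm_num

lemma A_loop (cs : List Char) : ∀ (f : List Int) (d : PySem.Dict String Int),
    vgood f → (∀ c ∈ cs, 38 ≤ c.toNat ∧ c.toNat ≤ 57) →
    cs.foldl pyAStep (some (d, f)) =
      some (((vstates f cs).tail.map generate_dict_key).foldl
              (fun d k => d.insert k (d.getD k 0 + 1)) d,
            cs.foldl vstep f) := by
  induction cs with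
  | nil => intro f d _ _; simp [vstates]
  | cons c cs ih =>
    intro f d hf hcs
    rw [List.foldl_cons, pyAStep_some f d c hf (hcs c List.mem_cons_self),
      ih (vstep f c) _ (vgood_vstep f c hf) (fun x hx => hcs x (List.mem_cons_of_mem _ hx))]
    simp only [vstates, List.tail_cons]
    conv_rhs => rw [vstates_head (vstep f c) cs]
    simp

lemma dictOf_getD {k : Type} [BEq k] [LawfulBEq k] (ks : List k) (v : k) :
    (dictOf ks).getD v 0 = (ks.count v : Int) := by
  unfold dictOf
  rw [PySem.Dict.getD_foldl_insert_add_one]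
  simp [PySem.Dict.getD_empty]

lemma A_values_sum (ks : List String) :
    (dictOf ks).values.foldl
      (fun answer v => answer + PySem.Int.floordiv (v * (v - 1)) 2) 0 = sumC ks := by
  rw [PySem.List.foldl_add _ (fun v => PySem.Int.floordiv (v * (v - 1)) 2) 0]
  have hnd : (dictOf ks).keys.Nodup := by
    unfold dictOf
    exact PySem.Dict.nodup_keys_foldl_insert _ _ _ (by simp [PySem.Dict.keys_empty])
  rw [PySem.Dict.values_eq_map_keys _ hnd 0, List.map_map]
  have hkeys : (dictOf ks).keys = PySem.Set.ofList ks := by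
    unfold dictOf
    rw [PySem.Dict.keys_foldl_insert]
    simp [PySem.Dict.keys_empty, PySem.Set.update_nil_left]
  rw [hkeys, zero_add]
  unfold sumC
  exact congrArg List.sum (List.map_congr_left (fun k _ => by simp [Function.comp, dictOf_getD, pvC]))

-- B's first loop
lemma vbxor (f : List Int) (c : Char) (hf : vgood f) :
    PySem.Int.bxor (f.getD (vpos c) 0) 1 = PySem.Int.mod (f.getD (vpos c) 0 + 1) 2 := by
  have h : f.getD (vpos c) 0 = 0 ∨ f.getD (vpos c) 0 = 1 := by
    by_cases hp : vpos c < f.length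
    · rw [List.getD_eq_getElem _ _ hp]
      exact hf.2 _ (List.getElem_mem hp)
    · rw [List.getD_eq_default _ _ (by omega)]
      exact Or.inl rfl
  rcases h with h | h <;> rw [h] <;> decide

lemma pyBStep_some (f : List Int) (acc : List (List Int)) (c : Char)
    (hf : vgood f) (hc : 38 ≤ c.toNat ∧ c.toNat ≤ 57) :
    pyBStep (some (f, acc)) c = some (vstep f c, acc ++ [vstep f c]) := by
  simp only [pyBStep, pyGet?_bridge f c hf.1 hc, pySetD_bridge f c _ hf.1 hc, vbxor f c hf]
  rfl

lemma B_loop (cs : List Char) : ∀ (f : List Int) (acc : List (List Int)),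
    vgood f → (∀ c ∈ cs, 38 ≤ c.toNat ∧ c.toNat ≤ 57) →
    cs.foldl pyBStep (some (f, acc)) =
      some (cs.foldl vstep f, acc ++ (vstates f cs).tail) := by
  induction cs with
  | nil => intro f acc _ _; simp [vstates]
  | cons c cs ih =>
    intro f acc hf hcs
    rw [List.foldl_cons, pyBStep_some f acc c hf (hcs c List.mem_cons_self),
      ih (vstep f c) _ (vgood_vstep f c hf) (fun x hx => hcs x (List.mem_cons_of_mem _ hx))]
    simp only [vstates, List.tail_cons]
    conv_rhs => rw [vstates_head (vstep f c) cs]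
    simp

-- B's zip scan is runScan
lemma zip_fold_runScan (t : List (List Int)) :
    ∀ (x : List Int) (ans run : Int),
    (((x :: t).zip t).foldl pyScanStep (ans, run)).1
      + pvC (((x :: t).zip t).foldl pyScanStep (ans, run)).2
      = runScan ans run x t := by
  induction t with
  | nil => intro x ans run; simp [runScan]
  | cons y r ih =>
    intro x ans run
    show ((((y :: r).zip r).foldl pyScanStep (pyScanStep (ans, run) (x, y)))).1
        + pvC ((((y :: r).zip r).foldl pyScanStep (pyScanStep (ans, run) (x, y)))).2
        = runScan ans run x (y :: r)
    by_cases h : y = x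
    · subst h
      rw [show pyScanStep (ans, run) (y, y) = (ans, run + 1) by simp [pyScanStep],
        show runScan ans run y (y :: r) = runScan ans (run + 1) y r by simp [runScan]]
      exact ih y ans (run + 1)
    · have hb : (y == x) = false := beq_eq_false_iff_ne.mpr h
      rw [show pyScanStep (ans, run) (x, y) = (ans + pvC run, 1) by simp [pyScanStep, hb],
        show runScan ans run x (y :: r) = runScan (ans + pvC run) 1 y r by simp [runScan, hb]]
      exact ih y (ans + pvC run) 1

-- the run-scan invariant on a sorted list
lemma runScan_inv (t : List (List Int)) :
    ∀ (x : List Int) (ans run : Int), (x :: t).Pairwise (· ≤ ·) →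
    runScan ans run x t
      = ans + pvC (run + (t.count x : Int)) + sumC (t.filter (fun k => !(k == x))) := by
  induction t with
  | nil => intro x ans run _; simp [runScan, sumC_nil]
  | cons y r ih =>
    intro x ans run hpw
    rcases List.pairwise_cons.mp hpw with ⟨hx, hpw2⟩
    rcases List.pairwise_cons.mp hpw2 with ⟨hy, hpw3⟩
    by_cases h : y = x
    · subst h
      have hpx : (y :: r).Pairwise (· ≤ ·) :=
        List.pairwise_cons.mpr ⟨fun z hz => hx z (List.mem_cons_of_mem _ hz), hpw3⟩
      rw [show runScan ans run y (y :: r) = runScan ans (run + 1) y r by simp [runScan]]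
      rw [ih y ans (run + 1) hpx]
      rw [List.count_cons_self, List.filter_cons_of_neg (by simp)]
      push_cast
      ring_nf
    · have hb : (y == x) = false := beq_eq_false_iff_ne.mpr h
      have hxmem : x ∉ (y :: r) := by
        intro hm
        rcases List.mem_cons.mp hm with hm | hm
        · exact h hm.symm
        · exact h (le_antisymm (hy x hm) (hx y List.mem_cons_self))
      rw [show runScan ans run x (y :: r) = runScan (ans + pvC run) 1 y r by simp [runScan, hb]]
      rw [ih y (ans + pvC run) 1 hpw2]
      have hc0 : (y :: r).count x = 0 := List.count_eq_zero.mpr hxmem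
      have hfs : (y :: r).filter (fun k => !(k == x)) = y :: r :=
        List.filter_eq_self.mpr (fun a ha => by
          simp only [Bool.not_eq_eq_eq_not, Bool.not_true, beq_eq_false_iff_ne]
          exact fun he => hxmem (he ▸ ha))
      rw [hc0, hfs, sumC_cons y r, List.count_cons_self]
      push_cast
      ring_nf

-- the port's sorted( states ) elaborates List's plain LT/DecidableLT instances; the PySem
-- order lemmas use the LinearOrder instance.  Both run the same insertion sort: the two
-- Decidable instances decide the same proposition, so the sorted lists are equal.
lemma sortedLO (xs : List (List Int)) :
    PySem.List.sorted xs (fun x => x) false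
      = @PySem.List.sorted (List Int) (List Int) ((List.instLinearOrder : LinearOrder (List Int))).toLT
          ((List.instLinearOrder : LinearOrder (List Int))).toDecidableLT xs (fun x => x) false := by
  have hlem := @PySem.List.sorted_eq_foldl_insertBy (List Int) (List Int)
    ((List.instLinearOrder : LinearOrder (List Int))).toLT
    ((List.instLinearOrder : LinearOrder (List Int))).toDecidableLT xs (fun x => x)
  rw [PySem.List.sorted_eq_foldl_insertBy, hlem]
  congr 1
  funext acc x
  congr 1
  funext a b
  exact decide_eq_decide.mpr Iff.rfl

-- ===== VERDICT (by name: the statement is the Claim_ definition above) =====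
theorem get_number_of_happy_substr_spec : Claim_equal_get_number_of_happy_substr := by
  intro s _ hpre
  replace hpre : ∀ c ∈ s.toList, 38 ≤ c.toNat ∧ c.toNat ≤ 57 := by
    intro c hc
    simpa using List.all_eq_true.mp hpre c hc
  unfold Spec_get_number_of_happy_substr
  have hgood0 : vgood (List.replicate 10 0) :=
    ⟨by simp, fun x hx => Or.inl (List.eq_of_mem_replicate hx)⟩
  have hgoodall := vgood_mem_vstates (List.replicate 10 0) s.toList hgood0
  -- A reduces to the sum of C(count, 2) over the key strings of all parity states
  have hA : get_number_of_happy_substr s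
      = sumC ((vstates (List.replicate 10 0) s.toList).map generate_dict_key) := by
    simp only [get_number_of_happy_substr]
    rw [A_loop s.toList (List.replicate 10 0) _ hgood0 hpre]
    dsimp only
    have hd : ((vstates (List.replicate 10 0) s.toList).tail.map generate_dict_key).foldl
          (fun d k => d.insert k (d.getD k 0 + 1))
          (PySem.Dict.empty.insert (generate_dict_key (List.replicate 10 0)) 1)
        = dictOf ((vstates (List.replicate 10 0) s.toList).map generate_dict_key) := by
      conv_rhs => rw [vstates_head (List.replicate 10 0) s.toList]
      simp [dictOf, PySem.Dict.getD_empty]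
    rw [hd, A_values_sum]
  -- A's key strings are an injective relabelling of the parity states
  have hKA : sumC ((vstates (List.replicate 10 0) s.toList).map generate_dict_key)
      = sumC (vstates (List.replicate 10 0) s.toList) := by
    apply sumC_map_inj
    intro a ha b hb hab
    have ha' := hgoodall a ha
    have hb' := hgoodall b hb
    exact genkey_inj a b (by rw [ha'.1, hb'.1]) ha'.2 hb'.2 hab
  -- B reduces to the run scan of the sorted list of parity states
  have hB : get_number_of_happy_substr_alt s
      = sumC (vstates (List.replicate 10 0) s.toList) := by
    simp only [get_number_of_happy_substr_alt]
    rw [B_loop s.toList (List.replicate 10 0) [List.replicate 10 0] hgood0 hpre]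
    dsimp only
    have hstates : [List.replicate 10 0] ++ (vstates (List.replicate 10 0) s.toList).tail
        = vstates (List.replicate 10 0) s.toList := by
      conv_rhs => rw [vstates_head (List.replicate 10 0) s.toList]
      rfl
    rw [hstates, PySem.List.slice_from_one, sortedLO]
    have hpw := PySem.List.sorted_pairwise (vstates (List.replicate 10 0) s.toList)
      (fun x : List Int => x)
    have hperm := @PySem.List.sorted_perm (List Int) (List Int) ((List.instLinearOrder : LinearOrder (List Int))).toLT
      ((List.instLinearOrder : LinearOrder (List Int))).toDecidableLT
      (vstates (List.replicate 10 0) s.toList) (fun x => x) false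
    cases hst : @PySem.List.sorted (List Int) (List Int) ((List.instLinearOrder : LinearOrder (List Int))).toLT
        ((List.instLinearOrder : LinearOrder (List Int))).toDecidableLT
        (vstates (List.replicate 10 0) s.toList) (fun x => x) false with
    | nil =>
      exfalso
      rw [hst] at hperm
      have := List.nil_perm.mp hperm
      rw [vstates_head (List.replicate 10 0) s.toList] at this
      exact List.cons_ne_nil _ _ this
    | cons x t =>
      rw [hst] at hpw hperm
      simp only [List.tail_cons]
      rw [zip_fold_runScan t x 0 1, runScan_inv t x 0 1 hpw, ← sumC_perm _ _ hperm,
        sumC_cons x t, List.count_cons_self]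
      push_cast
      ring_nf
  rw [hA, hKA, hB]
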